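-- pv_equiv track=rewrite | github.com/maojui/Regex-Generator | src/parser.py | cs_filter
-- ===== SOURCE A (Python) =====
-- def cs_filter(cs_set):
--     length = 1
--     while True :
--         cs_set = set(filter(lambda x : len(x) >= length, cs_set))
--         if len(cs_set) < 10 :
--             break
--         length += 1
--     return cs_set
-- ===== SOURCE B (Python) =====
-- def cs_filter(cs_set):
--     d = set(cs_set)
--     lens = sorted((len(x) for x in d), reverse=True)
--     threshold = 1 if len(lens) < 10 else lens[9] + 1
--     return {x for x in d if len(x) >= threshold}
-- ===== Notes on version B (the rewrite author's own statement) =====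
-- stated objective: faster
-- what changed: Instead of repeatedly rebuilding the set while raising the length threshold one step at a time, B dedups once, sorts the lengths descending, reads the 10th-largest length to get the final threshold in closed form, and filters once.
import Mathlib
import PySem

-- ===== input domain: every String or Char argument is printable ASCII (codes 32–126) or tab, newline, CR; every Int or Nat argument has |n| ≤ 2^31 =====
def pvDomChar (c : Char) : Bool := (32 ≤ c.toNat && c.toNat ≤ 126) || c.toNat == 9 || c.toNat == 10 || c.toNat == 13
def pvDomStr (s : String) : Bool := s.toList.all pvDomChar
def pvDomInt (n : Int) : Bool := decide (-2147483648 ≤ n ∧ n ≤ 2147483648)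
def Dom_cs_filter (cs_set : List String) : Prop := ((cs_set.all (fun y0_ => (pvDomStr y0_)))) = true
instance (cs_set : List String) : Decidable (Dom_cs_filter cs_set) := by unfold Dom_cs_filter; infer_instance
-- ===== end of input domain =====

-- B replaces A's threshold-raising loop of set rebuilds by: dedup once, sort lengths descending,
-- read the 10th-largest length as the final threshold, filter once (objective: faster).
-- Python len(s) on a string = number of characters
def pyLen (x : String) : Nat := x.toList.length

-- ===== PORT A =====
-- max length in a list, for the termination measure of A's while-loop
def maxLen (s : List String) : Nat := s.foldr (fun x acc => max (pyLen x) acc) 0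

theorem le_maxLen {s : List String} {x : String} (hx : x ∈ s) : pyLen x ≤ maxLen s := by
  induction s with
  | nil => cases hx
  | cons a t ih =>
    rcases List.mem_cons.mp hx with h | h
    · simp [maxLen, h]
    · simp only [maxLen, List.foldr_cons]
      exact le_trans (ih h) (le_max_right _ _)

theorem maxLen_le {s : List String} {n : Nat} (h : ∀ x ∈ s, pyLen x ≤ n) : maxLen s ≤ n := by
  induction s with
  | nil => simp [maxLen]
  | cons a t ih =>
    simp only [maxLen, List.foldr_cons, max_le_iff]
    exact ⟨h a (by simp), ih (fun x hx => h x (by simp [hx]))⟩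

-- A's while-loop body: cs_set = set(filter(lambda x: len(x) >= length, cs_set))
def stepA (s : List String) (len : Nat) : List String :=
  PySem.Set.ofList (s.filter (fun x => decide (len ≤ pyLen x)))

-- A's while-loop: rebuild the set, stop when < 10 remain, else raise the threshold
def csLoopA (s : List String) (len : Nat) : List String :=
  let s' := stepA s len
  if s'.length < 10 then s' else csLoopA s' (len + 1)
termination_by maxLen s + 2 - len
decreasing_by
  rename_i h
  have hne : stepA s len ≠ [] := by
    intro hnil
    apply h
    show (stepA s len).length < 10
    rw [hnil]; simp
  obtain ⟨x, hx⟩ := List.exists_mem_of_ne_nil _ hne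
  have hx' : x ∈ s.filter (fun x => decide (len ≤ pyLen x)) :=
    (PySem.Set.mem_ofList _ _).mp hx
  have hxs : x ∈ s := List.mem_of_mem_filter hx'
  have hlen : len ≤ pyLen x := by
    have := List.of_mem_filter hx'; simpa using this
  have h1 : len ≤ maxLen s := le_trans hlen (le_maxLen hxs)
  have h2 : maxLen (stepA s len) ≤ maxLen s := by
    apply maxLen_le
    intro y hy
    exact le_maxLen (List.mem_of_mem_filter ((PySem.Set.mem_ofList _ _).mp hy))
  omega

def cs_filter (cs_set : List String) : List String := csLoopA cs_set 1

-- ===== PORT B =====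
def cs_filter_alt (cs_set : List String) : List String :=
  let d := PySem.Set.ofList cs_set
  let lens := PySem.List.sorted (d.map (fun x => pyLen x)) (fun v => v) true
  let threshold := if lens.length < 10 then 1 else lens.getD 9 0 + 1
  d.filter (fun x => decide (threshold ≤ pyLen x))

-- ===== PRECONDITION & SPEC =====
def Spec_cs_filter (cs_set : List String) (out : List String) : Prop := out = cs_filter_alt cs_set
instance (cs_set : List String) (out : List String) : Decidable (Spec_cs_filter cs_set out) := by unfold Spec_cs_filter; infer_instance

-- ===== CLAIM (what is proved, stated in full; the proofs are below) =====
def Claim_equal_cs_filter : Prop := ∀ (cs_set : List String), Dom_cs_filter cs_set → Spec_cs_filter cs_set (cs_filter cs_set)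

-- ===== LEMMAS AND PROOFS =====

-- filtering by a higher threshold absorbs a lower one
theorem filter_ge_filter_ge {k m : Nat} (hkm : k ≤ m) (s : List String) :
    (s.filter (fun x => decide (k ≤ pyLen x))).filter (fun x => decide (m ≤ pyLen x))
      = s.filter (fun x => decide (m ≤ pyLen x)) := by
  rw [List.filter_filter]
  apply List.filter_congr
  intro x _
  by_cases h : m ≤ pyLen x
  · simp [h, le_trans hkm h]
  · simp [h]

-- the loop returns s filtered at the least threshold L ≥ k whose count drops below 10
theorem csLoopA_eq (s : List String) (k : Nat) :
    s.Nodup → ∀ L : Nat, k ≤ L →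
    (∀ m, k ≤ m → ((s.filter (fun x => decide (m ≤ pyLen x))).length < 10 ↔ L ≤ m)) →
    csLoopA s k = s.filter (fun x => decide (L ≤ pyLen x)) := by
  induction s, k using csLoopA.induct with
  | case1 s k s_ hlt =>
    intro hnd L hkL hiff
    have hstep : s_ = s.filter (fun x => decide (k ≤ pyLen x)) :=
      PySem.Set.ofList_eq_self_of_nodup _ (hnd.filter _)
    have hcnt : (s.filter (fun x => decide (k ≤ pyLen x))).length < 10 := by
      rw [← hstep]; exact hlt
    have hLk : L = k := le_antisymm ((hiff k le_rfl).mp hcnt) hkL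
    rw [csLoopA]
    show (if s_.length < 10 then s_ else csLoopA s_ (k + 1)) = _
    rw [if_pos hlt, hstep, hLk]
  | case2 s k s_ hlt ih =>
    intro hnd L hkL hiff
    have hstep : s_ = s.filter (fun x => decide (k ≤ pyLen x)) :=
      PySem.Set.ofList_eq_self_of_nodup _ (hnd.filter _)
    have hcnt : ¬ (s.filter (fun x => decide (k ≤ pyLen x))).length < 10 := by
      rw [← hstep]; exact hlt
    have hk1L : k + 1 ≤ L := by
      rcases Nat.lt_or_ge k L with hlk | hlk
      · omega
      · exact absurd ((hiff k le_rfl).mpr hlk) hcnt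
    rw [csLoopA]
    show (if s_.length < 10 then s_ else csLoopA s_ (k + 1)) = _
    rw [if_neg hlt]
    rw [ih (by rw [hstep]; exact hnd.filter _) L hk1L ?_]
    · rw [hstep, filter_ge_filter_ge hkL s]
    · intro m hm
      rw [hstep, filter_ge_filter_ge (by omega : k ≤ m) s]
      exact hiff m (by omega)

-- dedup (first occurrences) commutes with filter
theorem ofList_filter (p : String → Bool) (l : List String) :
    PySem.Set.ofList (l.filter p) = (PySem.Set.ofList l).filter p := by
  induction l using List.reverseRecOn with
  | nil => rfl
  | append_singleton l x ih =>
    rw [List.filter_append]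
    by_cases hpx : p x
    · rw [show List.filter p [x] = [x] from by simp [hpx],
          PySem.Set.ofList_append_singleton, PySem.Set.ofList_append_singleton,
          PySem.Set.add_eq_ite, PySem.Set.add_eq_ite, ih]
      by_cases hx : x ∈ PySem.Set.ofList l
      · rw [if_pos hx, if_pos (List.mem_filter.mpr ⟨hx, hpx⟩)]
      · rw [if_neg hx, if_neg (fun hc => hx (List.mem_filter.mp hc).1), List.filter_append]
        simp [hpx]
    · rw [show List.filter p [x] = [] from by simp [hpx], List.append_nil, ih,
          PySem.Set.ofList_append_singleton, PySem.Set.add_eq_ite]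
      by_cases hx : x ∈ PySem.Set.ofList l
      · rw [if_pos hx]
      · rw [if_neg hx, List.filter_append]
        simp [hpx]

-- the first loop iteration already dedups, so the loop may start from the dedup
theorem csLoopA_dedup (cs : List String) :
    csLoopA cs 1 = csLoopA (PySem.Set.ofList cs) 1 := by
  have h : stepA (PySem.Set.ofList cs) 1 = stepA cs 1 := by
    unfold stepA
    rw [← ofList_filter, PySem.Set.ofList_ofList]
  conv_lhs => rw [csLoopA]
  conv_rhs => rw [csLoopA, h]

-- counting elements ≥ m in a descending-sorted list, read off at index n
theorem countP_ge_iff : ∀ (l : List Nat), l.Pairwise (fun a b => b ≤ a) → ∀ (m n : Nat),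
    (n + 1 ≤ l.countP (fun v => decide (m ≤ v)) ↔ (n < l.length ∧ m ≤ l.getD n 0)) := by
  intro l
  induction l with
  | nil => intro _ m n; simp
  | cons a t ih =>
    intro hl m n
    obtain ⟨ha, ht⟩ := List.pairwise_cons.mp hl
    by_cases hpa : m ≤ a
    · rw [List.countP_cons,
          show (if (fun v => decide (m ≤ v)) a then 1 else 0) = 1 from by simp [hpa]]
      cases n with
      | zero =>
        simp only [List.length_cons, List.getD_cons_zero]
        constructor
        · intro _; exact ⟨Nat.succ_pos _, hpa⟩
        · intro _; omega
      | succ n =>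
        simp only [List.length_cons, List.getD_cons_succ]
        rw [show n + 1 + 1 ≤ t.countP (fun v => decide (m ≤ v)) + 1
              ↔ n + 1 ≤ t.countP (fun v => decide (m ≤ v)) from by omega,
            ih ht m n]
        omega
    · have hz : (a :: t).countP (fun v => decide (m ≤ v)) = 0 := by
        rw [List.countP_eq_zero]
        intro b hb
        rcases List.mem_cons.mp hb with he | he
        · simp [he]; omega
        · have : b ≤ a := ha b he
          simp; omega
      rw [hz]
      constructor
      · intro h; omega
      · rintro ⟨hn, hg⟩
        exfalso
        have hmem : (a :: t).getD n 0 ∈ a :: t := by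
          rw [List.getD_eq_getElem _ _ hn]
          exact List.getElem_mem _
        rcases List.mem_cons.mp hmem with he | he
        · rw [he] at hg; exact hpa hg
        · exact hpa (le_trans hg (ha _ he))

theorem cs_filter_spec : Claim_equal_cs_filter := by
  unfold Claim_equal_cs_filter
  intro cs _
  unfold Spec_cs_filter cs_filter cs_filter_alt
  set d := PySem.Set.ofList cs with hd
  set lens := PySem.List.sorted (d.map (fun x => pyLen x)) (fun v => v) true with hlens
  set T := if lens.length < 10 then 1 else lens.getD 9 0 + 1 with hT
  rw [csLoopA_dedup]
  have hpair : lens.Pairwise (fun a b => b ≤ a) := by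
    have := PySem.List.sorted_pairwise_rev (d.map (fun x => pyLen x)) (fun v => v)
    simpa using this
  have hcnt : ∀ m : Nat, (d.filter (fun x => decide (m ≤ pyLen x))).length
      = lens.countP (fun v => decide (m ≤ v)) := by
    intro m
    have hperm : lens.Perm (d.map (fun x => pyLen x)) :=
      PySem.List.sorted_perm (d.map (fun x => pyLen x)) (fun v => v) true
    rw [← List.countP_eq_length_filter, hperm.countP_eq, List.countP_map]
    rfl
  apply csLoopA_eq d 1 (PySem.Set.nodup_ofList cs) T
  · rw [hT]; split_ifs <;> omega
  · intro m hm
    rw [hcnt m]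
    have hS := countP_ge_iff lens hpair m 9
    have hle : lens.countP (fun v => decide (m ≤ v)) ≤ lens.length :=
      List.countP_le_length
    rw [hT]
    split_ifs with hlen
    · omega
    · omega
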